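-- pv_equiv track=rewrite | github.com/Mozeel-V/nebula-mini | src/train/train_mil.py | windows_by_events
-- ===== SOURCE A (Python) =====
-- def windows_by_events(text, events_per_window=16, stride_events=4):
--     toks = text.split()
--     idx = [i for i,t in enumerate(toks) if t.startswith("api:")]
--     if not idx:
--         return windows_by_tokens(text, events_per_window*8, max(1, stride_events)*8)
--     starts = idx + [len(toks)]
--     events = [" ".join(toks[starts[i]:starts[i+1]]) for i in range(len(starts)-1)]
--     wins = []
--     for i in range(0, len(events), stride_events):
--         seg = events[i:i+events_per_window]
--         if seg: wins.append(" ".join(seg))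
--     return wins
--
-- def windows_by_tokens(text, tokens_per_window=256, stride_tokens=64):
--     toks = text.split()
--     wins = []
--     for i in range(0, len(toks), stride_tokens):
--         seg = toks[i:i+tokens_per_window]
--         if seg: wins.append(" ".join(seg))
--     return wins
-- ===== SOURCE B (Python) =====
-- def windows_by_tokens(text, tokens_per_window=256, stride_tokens=64):
--     toks = text.split()
--     return [" ".join(toks[i:i+tokens_per_window])
--             for i in range(0, len(toks), stride_tokens) if toks[i:i+tokens_per_window]]
--
-- def windows_by_events(text, events_per_window=16, stride_events=4):
--     toks = text.split()
--     idx = [i for i in range(len(toks)) if toks[i].startswith("api:")]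
--     if not idx:
--         return windows_by_tokens(text, events_per_window*8, max(1, stride_events)*8)
--     # slide over event boundary indices: each window is ONE join of the original
--     # token slice, no intermediate list of per-event strings and no second pass
--     starts = idx + [len(toks)]
--     n = len(idx)
--     return [" ".join(toks[starts[i]:starts[min(i+events_per_window, n)]])
--             for i in range(0, n, stride_events)
--             if i < min(i+events_per_window, n)]
-- ===== Notes on version B (the rewrite author's own statement) =====
-- stated objective: simpler
-- what changed: B drops A's intermediate list of per-event joined strings and A's second slicing/appending pass over it: it computes the event boundary indices once and emits each window as a single comprehension of one join of the original token slice toks[starts[i]:starts[min(i+events_per_window,n)]].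
-- outside the precondition, e.g. on windows_by_events('api:a x api:b y', -1, 1): A returns ['api:a x'], B returns []
import Mathlib
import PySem

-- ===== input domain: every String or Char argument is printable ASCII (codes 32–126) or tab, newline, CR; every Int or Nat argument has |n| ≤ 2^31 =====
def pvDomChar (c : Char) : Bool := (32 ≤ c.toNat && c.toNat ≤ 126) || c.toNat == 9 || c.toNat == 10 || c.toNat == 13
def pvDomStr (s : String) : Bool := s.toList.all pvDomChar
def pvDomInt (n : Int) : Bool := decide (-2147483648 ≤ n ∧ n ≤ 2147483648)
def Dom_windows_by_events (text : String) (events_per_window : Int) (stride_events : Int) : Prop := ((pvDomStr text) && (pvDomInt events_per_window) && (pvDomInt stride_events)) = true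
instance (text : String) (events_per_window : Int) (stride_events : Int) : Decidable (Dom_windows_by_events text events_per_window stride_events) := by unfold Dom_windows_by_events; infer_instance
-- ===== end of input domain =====

-- B eliminates A's intermediate list of per-event joined strings and A's second append loop:
-- a single comprehension over event boundary indices joins each window's token slice once (objective: simpler).

-- ===== PORT A =====
def windows_by_tokens (text : String) (tokens_per_window : Int) (stride_tokens : Int) : List String :=
  let toks := PySem.Str.split₀ text
  (PySem.List.pyRange 0 (toks.length : Int) stride_tokens).foldl
    (fun wins i =>
      let seg := PySem.List.slice toks (some i) (some (i + tokens_per_window))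
      if !seg.isEmpty then wins ++ [PySem.Str.join " " seg] else wins) []

def windows_by_events (text : String) (events_per_window : Int) (stride_events : Int) : List String :=
  let toks := PySem.Str.split₀ text
  let idx := ((PySem.List.enumerate toks).filter (fun p => PySem.Str.startswith p.2 "api:")).map (fun p => p.1)
  if idx.isEmpty then
    windows_by_tokens text (events_per_window * 8) (max 1 stride_events * 8)
  else
    let starts := idx ++ [(toks.length : Int)]
    let events := (PySem.List.pyRange 0 ((starts.length : Int) - 1) 1).map
      (fun i => PySem.Str.join " " (PySem.List.slice toks (some (PySem.List.pyGetD starts i 0)) (some (PySem.List.pyGetD starts (i + 1) 0))))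
    (PySem.List.pyRange 0 (events.length : Int) stride_events).foldl
      (fun wins i =>
        let seg := PySem.List.slice events (some i) (some (i + events_per_window))
        if !seg.isEmpty then wins ++ [PySem.Str.join " " seg] else wins) []

-- ===== PORT B =====
def windows_by_tokens_alt (text : String) (tokens_per_window : Int) (stride_tokens : Int) : List String :=
  let toks := PySem.Str.split₀ text
  ((PySem.List.pyRange 0 (toks.length : Int) stride_tokens).filter
      (fun i => !(PySem.List.slice toks (some i) (some (i + tokens_per_window))).isEmpty)).map
    (fun i => PySem.Str.join " " (PySem.List.slice toks (some i) (some (i + tokens_per_window))))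

def windows_by_events_alt (text : String) (events_per_window : Int) (stride_events : Int) : List String :=
  let toks := PySem.Str.split₀ text
  let idx := (PySem.List.pyRange 0 (toks.length : Int) 1).filter
      (fun i => PySem.Str.startswith (PySem.List.pyGetD toks i "") "api:")
  if idx.isEmpty then
    windows_by_tokens_alt text (events_per_window * 8) (max 1 stride_events * 8)
  else
    let starts := idx ++ [(toks.length : Int)]
    let n := (idx.length : Int)
    ((PySem.List.pyRange 0 n stride_events).filter
        (fun i => decide (i < min (i + events_per_window) n))).map
      (fun i => PySem.Str.join " " (PySem.List.slice toks
        (some (PySem.List.pyGetD starts i 0))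
        (some (PySem.List.pyGetD starts (min (i + events_per_window) n) 0))))

-- ===== PRECONDITION & SPEC =====
-- Pre_ excludes (a) stride_events = 0 when an "api:" token is present — there A raises ValueError
-- (range() with zero step) — and (b) negative events_per_window of magnitude below the token count,
-- where A's slice stop events[i:i+epw] wraps around from the end of the list, an artefact of
-- Python slice semantics for a nonsensical negative window size.
def Pre_windows_by_events (text : String) (events_per_window : Int) (stride_events : Int) : Prop :=
  (stride_events ≠ 0 ∨ ∀ t ∈ PySem.Str.split₀ text, PySem.Str.startswith t "api:" = false)
  ∧ (0 ≤ events_per_window ∨ events_per_window ≤ -((PySem.Str.split₀ text).length : Int))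
instance (text : String) (events_per_window : Int) (stride_events : Int) : Decidable (Pre_windows_by_events text events_per_window stride_events) := by unfold Pre_windows_by_events; infer_instance

def pvWitness_windows_by_events : String × Int × Int := ("api:a x api:b y z", 2, 1)

def Spec_windows_by_events (text : String) (events_per_window : Int) (stride_events : Int) (out : List String) : Prop := out = windows_by_events_alt text events_per_window stride_events
instance (text : String) (events_per_window : Int) (stride_events : Int) (out : List String) : Decidable (Spec_windows_by_events text events_per_window stride_events out) := by unfold Spec_windows_by_events; infer_instance

-- ===== CLAIM (what is proved, stated in full; the proofs are below) =====
def Claim_equal_windows_by_events : Prop := ∀ (text : String) (events_per_window : Int) (stride_events : Int), Dom_windows_by_events text events_per_window stride_events → Pre_windows_by_events text events_per_window stride_events → Spec_windows_by_events text events_per_window stride_events (windows_by_events text events_per_window stride_events)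

-- ===== LEMMAS AND PROOFS =====

-- A's enumerate-based marker-index list equals B's range-filter one
lemma idx_eq (toks : List String) :
    ((PySem.List.enumerate toks).filter (fun p => PySem.Str.startswith p.2 "api:")).map (fun p => p.1)
      = (PySem.List.pyRange 0 (toks.length : Int) 1).filter
          (fun i => PySem.Str.startswith (PySem.List.pyGetD toks i "") "api:") := by
  rw [show PySem.List.enumerate toks = PySem.List.enumerate toks 0 from rfl,
      PySem.List.enumerate_eq_map_pyRange toks ""]
  rw [List.filter_map, List.map_map]
  simp [Function.comp_def]

-- pyRange with a negative step and a nonnegative upper bound is empty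
lemma pyRange_neg_nil (x s : Int) (h : s < 0) (hx : 0 ≤ x) : PySem.List.pyRange 0 x s = [] := by
  simp only [PySem.List.pyRange, zero_add, sub_zero, zero_sub, Int.ediv_neg, ite_eq_left_iff,
    List.map_eq_nil_iff, List.range_eq_nil]
  intro _; split_ifs <;> omega

-- join over an append of two nonempty lists of words
lemma join_append_of_ne_nil (sep : List Char) (l1 l2 : List (List Char)) (h1 : l1 ≠ []) (h2 : l2 ≠ []) :
    PySem.Chars.join sep (l1 ++ l2) = PySem.Chars.join sep l1 ++ sep ++ PySem.Chars.join sep l2 := by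
  induction l1 with
  | nil => exact absurd rfl h1
  | cons x t ih =>
    cases t with
    | nil =>
      cases l2 with
      | nil => exact absurd rfl h2
      | cons y r => simp [PySem.Chars.join_cons_cons, PySem.Chars.join_singleton]
    | cons x2 t2 =>
      have := ih (by simp)
      simp only [List.cons_append] at this ⊢
      rw [PySem.Chars.join_cons_cons, PySem.Chars.join_cons_cons, this]
      simp [List.append_assoc]

-- a slice with ordered in-range bounds splits at any midpoint
lemma slice_split {α : Type} (xs : List α) (a b c : Int) (h0 : 0 ≤ a) (hab : a ≤ b) (hbc : b ≤ c) :
    PySem.List.slice xs (some a) (some c)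
      = PySem.List.slice xs (some a) (some b) ++ PySem.List.slice xs (some b) (some c) := by
  rw [PySem.List.slice_toNat xs h0 (by omega), PySem.List.slice_toNat xs h0 (by omega),
      PySem.List.slice_toNat xs (by omega : (0:Int) ≤ b) (by omega)]
  have h1 : c.toNat - a.toNat = (b.toNat - a.toNat) + (c.toNat - b.toNat) := by omega
  rw [h1, List.take_add, List.drop_drop]
  have h2 : a.toNat + (b.toNat - a.toNat) = b.toNat := by omega
  rw [h2]

-- a slice with strictly ordered bounds inside the list is nonempty
lemma slice_ne_nil {α : Type} (xs : List α) (a b : Int) (h0 : 0 ≤ a) (hab : a < b) (hb : b ≤ (xs.length : Int)) :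
    PySem.List.slice xs (some a) (some b) ≠ [] := by
  intro h
  have := PySem.List.length_slice xs a b
  rw [h] at this
  have ha' : a = ((a.toNat : Nat) : Int) := by omega
  have hb' : b = ((b.toNat : Nat) : Int) := by omega
  rw [ha', hb', PySem.List.clampIdx_natCast, PySem.List.clampIdx_natCast] at this
  simp at this
  omega

lemma take_range' (s n m : Nat) : (List.range' s n).take m = List.range' s (min m n) := by
  apply List.ext_getElem
  · simp
  · intro i h1 h2
    simp [List.getElem_take, List.getElem_range']

lemma drop_range (n m : Nat) : (List.range n).drop m = List.range' m (n - m) := by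
  rw [List.range_eq_range', List.drop_range']
  simp

-- " ".join of a singleton list of strings
lemma str_join_singleton (x : String) : PySem.Str.join " " [x] = x := by
  apply String.toList_inj.mp
  rw [PySem.Str.toList_join]
  simp [PySem.Chars.join_singleton]

-- core window lemma: joining d+1 consecutive per-event joins equals one join of the
-- token slice between the outer boundaries
lemma join_window (toks : List String) (starts : List Int)
    (hb : ∀ k, k + 1 ≤ starts.length → 0 ≤ starts.getD k 0 ∧ starts.getD k 0 ≤ (toks.length : Int))
    (hm : ∀ k, k + 2 ≤ starts.length → starts.getD k 0 < starts.getD (k + 1) 0) :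
    ∀ d k, k + d + 2 ≤ starts.length →
      PySem.Str.join " " ((List.range' k (d + 1)).map (fun t =>
        PySem.Str.join " " (PySem.List.slice toks (some (starts.getD t 0)) (some (starts.getD (t + 1) 0)))))
      = PySem.Str.join " " (PySem.List.slice toks (some (starts.getD k 0)) (some (starts.getD (k + d + 1) 0))) := by
  intro d
  induction d with
  | zero =>
    intro k hk
    rw [List.range'_one]
    simp only [List.map_cons, List.map_nil]
    rw [str_join_singleton]
  | succ d ih =>
    intro k hk
    have hmono : ∀ a b : Nat, a ≤ b → b + 1 ≤ starts.length → starts.getD a 0 ≤ starts.getD b 0 := by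
      intro a b hab hbl
      induction b with
      | zero =>
        have : a = 0 := by omega
        subst this; rfl
      | succ b ihb =>
        rcases Nat.lt_or_ge a (b+1) with h | h
        · exact le_trans (ihb (by omega) (by omega)) (le_of_lt (hm b (by omega)))
        · have : a = b + 1 := by omega
          subst this; rfl
    apply String.toList_inj.mp
    rw [PySem.Str.toList_join, PySem.Str.toList_join]
    rw [List.range'_succ]
    simp only [List.map_cons]
    have hrest_ne : ((List.range' (k+1) (d+1)).map (fun t =>
        PySem.Str.join " " (PySem.List.slice toks (some (starts.getD t 0)) (some (starts.getD (t + 1) 0))))).map String.toList ≠ [] := by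
      simp [List.range'_eq_nil_iff]
    have h1 : (PySem.Str.join " " (PySem.List.slice toks (some (starts.getD k 0)) (some (starts.getD (k + 1) 0)))).toList
        :: ((List.range' (k+1) (d+1)).map fun t =>
          PySem.Str.join " " (PySem.List.slice toks (some (starts.getD t 0)) (some (starts.getD (t + 1) 0)))).map String.toList
        = [(PySem.Str.join " " (PySem.List.slice toks (some (starts.getD k 0)) (some (starts.getD (k + 1) 0)))).toList]
          ++ ((List.range' (k+1) (d+1)).map fun t =>
          PySem.Str.join " " (PySem.List.slice toks (some (starts.getD t 0)) (some (starts.getD (t + 1) 0)))).map String.toList := by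
      simp
    rw [h1, join_append_of_ne_nil _ _ _ (by simp) hrest_ne, PySem.Chars.join_singleton]
    rw [← PySem.Str.toList_join, ih (k+1) (by omega)]
    have hkd : k + (d + 1) + 1 = k + d + 2 := by omega
    have hsplit := slice_split toks (starts.getD k 0) (starts.getD (k+1) 0) (starts.getD (k+d+2) 0)
      (hb k (by omega)).1 (le_of_lt (hm k (by omega))) (hmono (k+1) (k+d+2) (by omega) (by omega))
    have hseg1_ne : PySem.List.slice toks (some (starts.getD k 0)) (some (starts.getD (k+1) 0)) ≠ [] :=
      slice_ne_nil toks _ _ (hb k (by omega)).1 (hm k (by omega))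
        (le_trans (hmono (k+1) (k+d+2) (by omega) (by omega)) (hb (k+d+2) (by omega)).2)
    have hseg2_ne : PySem.List.slice toks (some (starts.getD (k+1) 0)) (some (starts.getD (k+d+2) 0)) ≠ [] :=
      slice_ne_nil toks _ _ (hb (k+1) (by omega)).1
        (lt_of_lt_of_le (hm (k+1) (by omega)) (hmono (k+2) (k+d+2) (by omega) (by omega)))
        (hb (k+d+2) (by omega)).2
    rw [hkd, hsplit, List.map_append,
        join_append_of_ne_nil _ _ _
          (by simp only [ne_eq, List.map_eq_nil_iff]; exact hseg1_ne)
          (by simp only [ne_eq, List.map_eq_nil_iff]; exact hseg2_ne)]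
    simp [PySem.Str.toList_join, show k + 1 + d + 1 = k + d + 2 from by omega]

-- the fallback branch: A's append loop is B's filter-map comprehension
lemma tokens_helper_eq (text : String) (a b : Int) :
    windows_by_tokens text a b = windows_by_tokens_alt text a b := by
  unfold windows_by_tokens windows_by_tokens_alt
  rw [PySem.List.foldl_append_if
    (fun i => !(PySem.List.slice (PySem.Str.split₀ text) (some i) (some (i + a))).isEmpty)
    (fun i => PySem.Str.join " " (PySem.List.slice (PySem.Str.split₀ text) (some i) (some (i + a))))]
  simp

-- the api branch with a positive stride: A's foldl over per-event joins equals B's comprehension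
lemma main_branch (toks : List String) (idx : List Int) (epw stride : Int)
    (hpair : List.Pairwise (· < ·) idx)
    (hmemb : ∀ x ∈ idx, 0 ≤ x ∧ x < (toks.length : Int))
    (hnN : idx.length ≤ toks.length)
    (hs : 0 < stride)
    (hepw : 0 ≤ epw ∨ epw ≤ -((toks.length : Int))) :
    (PySem.List.pyRange 0
        ((((PySem.List.pyRange 0 (((idx ++ [(toks.length : Int)]).length : Int) - 1) 1).map
          (fun i => PySem.Str.join " " (PySem.List.slice toks
            (some (PySem.List.pyGetD (idx ++ [(toks.length : Int)]) i 0))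
            (some (PySem.List.pyGetD (idx ++ [(toks.length : Int)]) (i + 1) 0))))).length : Int)) stride).foldl
      (fun wins i =>
        if !(PySem.List.slice
          ((PySem.List.pyRange 0 (((idx ++ [(toks.length : Int)]).length : Int) - 1) 1).map
            (fun i => PySem.Str.join " " (PySem.List.slice toks
              (some (PySem.List.pyGetD (idx ++ [(toks.length : Int)]) i 0))
              (some (PySem.List.pyGetD (idx ++ [(toks.length : Int)]) (i + 1) 0)))))
          (some i) (some (i + epw))).isEmpty
        then wins ++ [PySem.Str.join " " (PySem.List.slice
          ((PySem.List.pyRange 0 (((idx ++ [(toks.length : Int)]).length : Int) - 1) 1).map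
            (fun i => PySem.Str.join " " (PySem.List.slice toks
              (some (PySem.List.pyGetD (idx ++ [(toks.length : Int)]) i 0))
              (some (PySem.List.pyGetD (idx ++ [(toks.length : Int)]) (i + 1) 0)))))
          (some i) (some (i + epw)))]
        else wins) []
    = ((PySem.List.pyRange 0 (idx.length : Int) stride).filter
        (fun i => decide (i < min (i + epw) (idx.length : Int)))).map
      (fun i => PySem.Str.join " " (PySem.List.slice toks
        (some (PySem.List.pyGetD (idx ++ [(toks.length : Int)]) i 0))
        (some (PySem.List.pyGetD (idx ++ [(toks.length : Int)]) (min (i + epw) (idx.length : Int)) 0)))) := by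
  have hslen : (idx ++ [(toks.length : Int)]).length = idx.length + 1 := by simp
  have hpair' : List.Pairwise (· < ·) (idx ++ [(toks.length : Int)]) := by
    rw [List.pairwise_append]
    refine ⟨hpair, List.pairwise_singleton _ _, fun x hx y hy => ?_⟩
    simp only [List.mem_singleton] at hy
    subst hy
    exact (hmemb x hx).2
  have hb : ∀ k, k + 1 ≤ (idx ++ [(toks.length : Int)]).length →
      0 ≤ (idx ++ [(toks.length : Int)]).getD k 0 ∧
        (idx ++ [(toks.length : Int)]).getD k 0 ≤ (toks.length : Int) := by
    intro k hk
    rw [List.getD_eq_getElem _ _ (by omega)]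
    by_cases hkn : k < idx.length
    · rw [List.getElem_append_left hkn]
      have := hmemb _ (List.getElem_mem hkn)
      omega
    · have hkk : k = idx.length := by omega
      subst hkk
      rw [List.getElem_append_right (le_refl _)]
      simp
  have hm : ∀ k, k + 2 ≤ (idx ++ [(toks.length : Int)]).length →
      (idx ++ [(toks.length : Int)]).getD k 0 < (idx ++ [(toks.length : Int)]).getD (k + 1) 0 := by
    intro k hk
    rw [List.getD_eq_getElem _ _ (by omega), List.getD_eq_getElem _ _ (by omega)]
    exact List.pairwise_iff_getElem.mp hpair' k (k + 1) (by omega) (by omega) (by omega)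
  have hlen1 : (((idx ++ [(toks.length : Int)]).length : Int) - 1) = (idx.length : Int) := by
    rw [hslen]; push_cast; ring
  have hev : (PySem.List.pyRange 0 (((idx ++ [(toks.length : Int)]).length : Int) - 1) 1).map
      (fun i => PySem.Str.join " " (PySem.List.slice toks
        (some (PySem.List.pyGetD (idx ++ [(toks.length : Int)]) i 0))
        (some (PySem.List.pyGetD (idx ++ [(toks.length : Int)]) (i + 1) 0))))
      = (List.range idx.length).map (fun t => PySem.Str.join " " (PySem.List.slice toks
        (some ((idx ++ [(toks.length : Int)]).getD t 0))
        (some ((idx ++ [(toks.length : Int)]).getD (t + 1) 0)))) := by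
    rw [hlen1, PySem.List.pyRange_one, List.map_map]
    apply List.map_congr_left
    intro t ht
    simp only [Function.comp_apply, zero_add]
    rw [PySem.List.pyGetD_natCast, show ((t : Int) + 1) = (((t + 1 : Nat)) : Int) by push_cast; ring,
        PySem.List.pyGetD_natCast]
  simp only [hev, List.length_map, List.length_range]
  rw [PySem.List.foldl_append_if
      (fun i => !(PySem.List.slice ((List.range idx.length).map (fun t => PySem.Str.join " " (PySem.List.slice toks
        (some ((idx ++ [(toks.length : Int)]).getD t 0))
        (some ((idx ++ [(toks.length : Int)]).getD (t + 1) 0))))) (some i) (some (i + epw))).isEmpty)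
      (fun i => PySem.Str.join " " (PySem.List.slice ((List.range idx.length).map (fun t => PySem.Str.join " " (PySem.List.slice toks
        (some ((idx ++ [(toks.length : Int)]).getD t 0))
        (some ((idx ++ [(toks.length : Int)]).getD (t + 1) 0))))) (some i) (some (i + epw))))]
  rw [List.nil_append]
  have hguard : ∀ i ∈ PySem.List.pyRange 0 (idx.length : Int) stride,
      (!(PySem.List.slice ((List.range idx.length).map (fun t => PySem.Str.join " " (PySem.List.slice toks
        (some ((idx ++ [(toks.length : Int)]).getD t 0))
        (some ((idx ++ [(toks.length : Int)]).getD (t + 1) 0))))) (some i) (some (i + epw))).isEmpty)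
      = decide (i < min (i + epw) (idx.length : Int)) := by
    intro i hi
    obtain ⟨h0i, hin, -⟩ := (PySem.List.mem_pyRange_iff_of_pos hs i).mp hi
    rw [Bool.eq_iff_iff]
    rcases hepw with he | he
    · rw [PySem.List.slice_toNat _ h0i (by omega)]
      simp only [Bool.not_eq_true', List.isEmpty_eq_false_iff, ne_eq, List.take_eq_nil_iff,
        List.drop_eq_nil_iff, List.length_map, List.length_range, decide_eq_true_eq, not_or]
      omega
    · have hneg : i + epw < 0 := by omega
      have hq : i + epw = -(((-(i + epw)).toNat : Nat) : Int) := by omega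
      have hlen0 : (PySem.List.slice ((List.range idx.length).map (fun t => PySem.Str.join " " (PySem.List.slice toks
          (some ((idx ++ [(toks.length : Int)]).getD t 0))
          (some ((idx ++ [(toks.length : Int)]).getD (t + 1) 0))))) (some i) (some (i + epw))).length = 0 := by
        rw [PySem.List.length_slice, hq, PySem.List.clampIdx_neg_natCast _ _ (by omega),
            show i = ((i.toNat : Nat) : Int) by omega, PySem.List.clampIdx_natCast]
        simp only [List.length_map, List.length_range]
        omega
      have hnil := List.length_eq_zero_iff.mp hlen0
      rw [hnil]
      simp only [List.isEmpty_nil, Bool.not_true, Bool.false_eq_true, false_iff,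
        decide_eq_true_eq, not_lt]
      omega
  rw [List.filter_congr hguard]
  apply List.map_congr_left
  intro i hif
  obtain ⟨hi, hp⟩ := List.mem_filter.mp hif
  have hlt : i < min (i + epw) (idx.length : Int) := of_decide_eq_true hp
  obtain ⟨h0i, hin, -⟩ := (PySem.List.mem_pyRange_iff_of_pos hs i).mp hi
  have hkm : i.toNat < (min (i + epw) (idx.length : Int)).toNat := by omega
  have hmn : (min (i + epw) (idx.length : Int)).toNat ≤ idx.length := by omega
  have hslice : PySem.List.slice ((List.range idx.length).map (fun t => PySem.Str.join " " (PySem.List.slice toks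
      (some ((idx ++ [(toks.length : Int)]).getD t 0))
      (some ((idx ++ [(toks.length : Int)]).getD (t + 1) 0))))) (some i) (some (i + epw))
      = (List.range' i.toNat ((min (i + epw) (idx.length : Int)).toNat - i.toNat)).map
        (fun t => PySem.Str.join " " (PySem.List.slice toks
          (some ((idx ++ [(toks.length : Int)]).getD t 0))
          (some ((idx ++ [(toks.length : Int)]).getD (t + 1) 0)))) := by
    rw [PySem.List.slice_toNat _ h0i (by omega), ← List.map_drop, ← List.map_take,
        drop_range, take_range']
    congr 2
    omega
  rw [hslice]
  have e1 : PySem.List.pyGetD (idx ++ [(toks.length : Int)]) i 0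
      = (idx ++ [(toks.length : Int)]).getD i.toNat 0 := by
    conv_lhs => rw [show i = ((i.toNat : Nat) : Int) by omega]
    rw [PySem.List.pyGetD_natCast]
  have e2 : PySem.List.pyGetD (idx ++ [(toks.length : Int)]) (min (i + epw) (idx.length : Int)) 0
      = (idx ++ [(toks.length : Int)]).getD (min (i + epw) (idx.length : Int)).toNat 0 := by
    conv_lhs => rw [show min (i + epw) (idx.length : Int)
      = (((min (i + epw) (idx.length : Int)).toNat : Nat) : Int) by omega]
    rw [PySem.List.pyGetD_natCast]
  rw [e1, e2]
  have hjw := join_window toks (idx ++ [(toks.length : Int)]) hb hm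
    ((min (i + epw) (idx.length : Int)).toNat - i.toNat - 1) i.toNat (by rw [hslen]; omega)
  rw [show (min (i + epw) (idx.length : Int)).toNat - i.toNat - 1 + 1
        = (min (i + epw) (idx.length : Int)).toNat - i.toNat from by omega,
      show i.toNat + ((min (i + epw) (idx.length : Int)).toNat - i.toNat - 1) + 1
        = (min (i + epw) (idx.length : Int)).toNat from by omega] at hjw
  exact hjw

theorem windows_by_events_spec : Claim_equal_windows_by_events := by
  intro text epw stride _dom pre
  unfold Spec_windows_by_events windows_by_events windows_by_events_alt
  simp only [← idx_eq]
  by_cases hempty : (((PySem.List.enumerate (PySem.Str.split₀ text)).filter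
      (fun p => PySem.Str.startswith p.2 "api:")).map (fun p => p.1)).isEmpty
  · simp only [hempty, if_true]
    exact tokens_helper_eq text (epw * 8) (max 1 stride * 8)
  · simp only [hempty, Bool.false_eq_true, if_false]
    have hne : (((PySem.List.enumerate (PySem.Str.split₀ text)).filter
        (fun p => PySem.Str.startswith p.2 "api:")).map (fun p => p.1)) ≠ [] := by
      intro h; rw [h] at hempty; exact hempty rfl
    have hapi : ¬ (∀ t ∈ PySem.Str.split₀ text, PySem.Str.startswith t "api:" = false) := by
      intro hall
      apply hne
      rw [List.map_eq_nil_iff, List.filter_eq_nil_iff]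
      intro p hp
      obtain ⟨k, hk, rfl⟩ := (PySem.List.mem_enumerate_iff _ _ _).mp hp
      simpa using hall _ (List.getElem_mem hk)
    have hstride : stride ≠ 0 := by
      rcases pre.1 with h | h
      · exact h
      · exact absurd h hapi
    rcases lt_trichotomy stride 0 with hneg | hzero | hpos
    · rw [pyRange_neg_nil _ _ hneg (by positivity), pyRange_neg_nil _ _ hneg (by positivity)]
      rfl
    · exact absurd hzero hstride
    · have hpair : List.Pairwise (· < ·) (((PySem.List.enumerate (PySem.Str.split₀ text)).filter
          (fun p => PySem.Str.startswith p.2 "api:")).map (fun p => p.1)) := by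
        exact List.Pairwise.map (fun (p : Int × String) => p.1)
          (fun (a b : Int × String) (h : a.1 < b.1) => h)
          (List.Pairwise.filter (fun p => PySem.Str.startswith p.2 "api:")
            (PySem.List.pairwise_lt_enumerate (PySem.Str.split₀ text) 0))
      have hmemb : ∀ x ∈ (((PySem.List.enumerate (PySem.Str.split₀ text)).filter
          (fun p => PySem.Str.startswith p.2 "api:")).map (fun p => p.1)),
          0 ≤ x ∧ x < ((PySem.Str.split₀ text).length : Int) := by
        intro x hx
        obtain ⟨p, hp, rfl⟩ := List.mem_map.mp hx
        obtain ⟨k, hk, rfl⟩ := (PySem.List.mem_enumerate_iff _ _ _).mp (List.mem_of_mem_filter hp)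
        simp; omega
      have hnN : (((PySem.List.enumerate (PySem.Str.split₀ text)).filter
          (fun p => PySem.Str.startswith p.2 "api:")).map (fun p => p.1)).length
          ≤ (PySem.Str.split₀ text).length := by
        rw [List.length_map]
        calc _ ≤ (PySem.List.enumerate (PySem.Str.split₀ text)).length :=
              List.length_filter_le _ _
          _ = _ := PySem.List.length_enumerate _ _
      exact main_branch (PySem.Str.split₀ text) _ epw stride hpair hmemb hnN hpos pre.2
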